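-- pv_equiv track=rewrite | github.com/denizozerr/Bluegem_Finder | Bluegem_Finder_mk3.py | categorize_numbers
-- ===== SOURCE A (Python) =====
-- categories = {
--     "Blue-Gem": ["490", "148", "69", "704", "504"],
--     "Rank 1": ["16", "48", "66", "67", "96", "111", "117", "159", "259", "263", "273", "297", "308", "321", "324",
--                "341", "347", "461", "482", "517", "530", "567", "587", "674", "695", "723", "764", "772", "781", "790",
--                "792", "843", "880", "885", "904", "948", "990"],
--     "Rank 2": ["09", "116", "134", "158", "168", "225", "338", "354", "356", "365", "370", "386", "406", "426", "433",
--                "441", "483", "537", "542", "592", "607", "611", "651", "668", "673", "696", "730", "743", "820", "846",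
--                "856", "857", "870", "876", "878", "882", "898", "900", "925", "942", "946", "951", "953", "970", "998"]
-- }
--
-- def categorize_numbers(text):
--     """Tespit edilen numaraları kategorize eder ve Paint Seed'e göre filtreleme yapar."""
--     extracted_numbers = text.split()
--     categorized = {cat: [] for cat in categories.keys()}
--     all_numbers = []
--
--     for num in extracted_numbers:
--         all_numbers.append(num)
--         matched = False
--
--         if "Paint Seed:" in num:
--             paint_seed = num.split(":")[1].strip()
--             matched = False
--             # Eğer Paint Seed değerine göre kategori var ise
--             for cat, num_list in categories.items():
--                 if paint_seed in num_list:
--                     categorized[cat].append(paint_seed)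
--                     matched = True
--                     break
--
--             if not matched:
--                 categorized["Diğer"].append(paint_seed)
--             continue  # Paint Seed'e odaklanıyoruz, diğerleriyle işlem yapmıyoruz.
--
--         # Pattern ID'ler ile eşleşmeleri kontrol et
--         for cat, num_list in categories.items():
--             if num in num_list:
--                 categorized[cat].append(num)
--                 matched = True
--                 break
--
--         if not matched:
--             if "Diğer" not in categorized:
--                 categorized["Diğer"] = []
--             categorized["Diğer"].append(num)
--
--     return categorized, all_numbers
-- ===== SOURCE B (Python) =====
-- BLUE = "490 148 69 704 504".split()
-- RANK1 = ("16 48 66 67 96 111 117 159 259 263 273 297 308 321 324 341 347 461 482 517 530 567 587 "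
--          "674 695 723 764 772 781 790 792 843 880 885 904 948 990").split()
-- RANK2 = ("09 116 134 158 168 225 338 354 356 365 370 386 406 426 433 441 483 537 542 592 607 611 "
--          "651 668 673 696 730 743 820 846 856 857 870 876 878 882 898 900 925 942 946 951 953 970 998").split()
--
--
-- def categorize_numbers(text):
--     """Same classification done by staged filter passes (one per category) instead of a per-token scan."""
--     tokens = text.split()
--     categorized = {
--         "Blue-Gem": [t for t in tokens if t in BLUE],
--         "Rank 1": [t for t in tokens if t in RANK1 and t not in BLUE],
--         "Rank 2": [t for t in tokens if t in RANK2 and t not in BLUE and t not in RANK1],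
--     }
--     others = [t for t in tokens if t not in BLUE and t not in RANK1 and t not in RANK2]
--     if others:
--         categorized["Diğer"] = others
--     return categorized, tokens
-- ===== Notes on version B (the rewrite author's own statement) =====
-- stated objective: idiomatic
-- what changed: Replaces A's single stateful loop (per-token scan of the three category lists, dict mutation, a dead 'Paint Seed:' branch and lazy 'Diğer' key creation) by staged declarative passes: one filter comprehension per category with explicit first-match guards, then one pass for the unmatched tokens.
import Mathlib
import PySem

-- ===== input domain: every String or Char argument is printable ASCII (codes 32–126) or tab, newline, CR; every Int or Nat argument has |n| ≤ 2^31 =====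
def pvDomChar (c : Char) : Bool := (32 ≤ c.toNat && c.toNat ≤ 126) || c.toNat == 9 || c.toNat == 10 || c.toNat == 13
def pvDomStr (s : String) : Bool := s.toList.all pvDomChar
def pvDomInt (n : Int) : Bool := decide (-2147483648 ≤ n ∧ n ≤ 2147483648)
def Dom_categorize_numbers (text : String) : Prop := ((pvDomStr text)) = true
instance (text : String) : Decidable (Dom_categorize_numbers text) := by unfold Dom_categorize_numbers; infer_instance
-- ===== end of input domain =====

-- B replaces A's stateful per-token loop (with its dead 'Paint Seed:' branch) by staged
-- declarative filter passes, one per category with explicit first-match guards (same return value).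

-- module-level constant `categories` of Python A
def pyCategories : PySem.Dict String (List String) := PySem.Dict.ofList
  [("Blue-Gem", ["490", "148", "69", "704", "504"]),
   ("Rank 1", ["16", "48", "66", "67", "96", "111", "117", "159", "259", "263", "273", "297", "308", "321", "324",
               "341", "347", "461", "482", "517", "530", "567", "587", "674", "695", "723", "764", "772", "781", "790",
               "792", "843", "880", "885", "904", "948", "990"]),
   ("Rank 2", ["09", "116", "134", "158", "168", "225", "338", "354", "356", "365", "370", "386", "406", "426", "433",
               "441", "483", "537", "542", "592", "607", "611", "651", "668", "673", "696", "730", "743", "820", "846",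
               "856", "857", "870", "876", "878", "882", "898", "900", "925", "942", "946", "951", "953", "970", "998"])]

-- ===== PORT A =====
-- A's inner `for cat, num_list in categories.items(): if num in num_list: categorized[cat].append(num); break`
def pvMatchLoopA (items : List (String × List String)) (d : PySem.Dict String (List String))
    (num : String) : PySem.Dict String (List String) × Bool :=
  match items with
  | [] => (d, false)
  | (cat, numList) :: rest =>
      if num ∈ numList then (d.modify cat [] (· ++ [num]), true)
      else pvMatchLoopA rest d num

-- one iteration of A's `for num in extracted_numbers` loop; state = (categorized, all_numbers)
def pvStepA (st : PySem.Dict String (List String) × List String) (num : String) :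
    PySem.Dict String (List String) × List String :=
  let all := st.2 ++ [num]
  let d := st.1
  if PySem.Str.isIn "Paint Seed:" num then
    -- dead on whitespace-split tokens (a token never contains the space of "Paint Seed:")
    match PySem.List.pyGet? ((PySem.Str.split? num ":").getD []) 1 with
    | none => (d, all)                      -- Python would raise IndexError; unreachable
    | some piece =>
      let paintSeed := PySem.Str.strip piece
      let (d', matched) := pvMatchLoopA pyCategories.items d paintSeed
      if matched then (d', all)
      else
        match d'.get? "Diğer" with
        | some l => (d'.insert "Diğer" (l ++ [paintSeed]), all)
        | none => (d', all)                 -- Python would raise KeyError; unreachable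
  else
    let (d', matched) := pvMatchLoopA pyCategories.items d num
    if matched then (d', all)
    else
      let d'' := if d'.contains "Diğer" then d' else d'.insert "Diğer" []
      (d''.modify "Diğer" [] (· ++ [num]), all)

def categorize_numbers (text : String) : (List (String × List String)) × List String :=
  let extracted := PySem.Str.split₀ text
  let categorized := pyCategories.keys.foldl
    (fun d cat => d.insert cat ([] : List String)) PySem.Dict.empty
  let res := extracted.foldl pvStepA (categorized, [])
  (res.1.items, res.2)

-- ===== PORT B =====
-- B's module constants, defined (as in Source B) by splitting one literal string each
def pvBLUE : List String := PySem.Str.split₀ "490 148 69 704 504"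
def pvRANK1 : List String := PySem.Str.split₀
  "16 48 66 67 96 111 117 159 259 263 273 297 308 321 324 341 347 461 482 517 530 567 587 674 695 723 764 772 781 790 792 843 880 885 904 948 990"
def pvRANK2 : List String := PySem.Str.split₀
  "09 116 134 158 168 225 338 354 356 365 370 386 406 426 433 441 483 537 542 592 607 611 651 668 673 696 730 743 820 846 856 857 870 876 878 882 898 900 925 942 946 951 953 970 998"

def categorize_numbers_alt (text : String) : (List (String × List String)) × List String :=
  let tokens := PySem.Str.split₀ text
  let categorized : List (String × List String) :=
    [("Blue-Gem", tokens.filter (fun t => pvBLUE.contains t)),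
     ("Rank 1", tokens.filter (fun t => pvRANK1.contains t && !pvBLUE.contains t)),
     ("Rank 2", tokens.filter (fun t => pvRANK2.contains t && !pvBLUE.contains t && !pvRANK1.contains t))]
  let others := tokens.filter
    (fun t => !pvBLUE.contains t && !pvRANK1.contains t && !pvRANK2.contains t)
  let categorized := if others.isEmpty then categorized else categorized ++ [("Diğer", others)]
  (categorized, tokens)

-- ===== PRECONDITION & SPEC =====
def Spec_categorize_numbers (text : String) (out : (List (String × List String)) × List String) : Prop := out = categorize_numbers_alt text
instance (text : String) (out : (List (String × List String)) × List String) : Decidable (Spec_categorize_numbers text out) := by unfold Spec_categorize_numbers; infer_instance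

-- ===== CLAIM (what is proved, stated in full; the proofs are below) =====
def Claim_equal_categorize_numbers : Prop := ∀ (text : String), Dom_categorize_numbers text → Spec_categorize_numbers text (categorize_numbers text)

-- ===== LEMMAS AND PROOFS =====

-- first matching category of a token (first-match priority over the fixed items list)
def pvClassify (items : List (String × List String)) (t : String) : Option String :=
  (items.find? (fun p => decide (t ∈ p.2))).map (·.1)

-- canonical dict contents after processing tokens ts
def pvShape (bs r1 r2 os : List String) : PySem.Dict String (List String) :=
  PySem.Dict.mk ([("Blue-Gem", bs), ("Rank 1", r1), ("Rank 2", r2)]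
    ++ if os = [] then [] else [("Diğer", os)])

theorem pvMatchLoopA_eq (items : List (String × List String))
    (d : PySem.Dict String (List String)) (num : String) :
    pvMatchLoopA items d num =
      (match pvClassify items num with
       | some c => d.modify c [] (· ++ [num])
       | none => d,
       (pvClassify items num).isSome) := by
  induction items with
  | nil => rfl
  | cons p rest ih =>
    obtain ⟨cat, numList⟩ := p
    by_cases h : num ∈ numList <;> simp [pvMatchLoopA, pvClassify, h] at ih ⊢ <;> exact ih

-- tokens produced by str.split() contain no whitespace character
theorem pv_split₀_go_no_space (s cur : List Char) (acc : List (List Char))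
    (hacc : ∀ tk ∈ acc, ∀ c ∈ tk, PySem.Chars.isspace c = false)
    (hcur : ∀ c ∈ cur, PySem.Chars.isspace c = false) :
    ∀ tk ∈ PySem.Chars.split₀.go s cur acc, ∀ c ∈ tk, PySem.Chars.isspace c = false := by
  induction s generalizing cur acc with
  | nil =>
    intro tk htk
    unfold PySem.Chars.split₀.go at htk
    split at htk <;> simp [List.mem_reverse] at htk
    · exact hacc tk htk
    · rcases htk with h | h
      · exact hacc tk h
      · subst h; intro c hc; exact hcur c (List.mem_reverse.mp hc)
  | cons c rest ih =>
    intro tk htk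
    unfold PySem.Chars.split₀.go at htk
    split at htk
    · split at htk
      · exact ih [] acc hacc (by simp) tk htk
      · refine ih [] (cur.reverse :: acc) ?_ (by simp) tk htk
        intro tk' htk'
        rcases List.mem_cons.mp htk' with h | h
        · subst h; intro c' hc'; exact hcur c' (List.mem_reverse.mp hc')
        · exact hacc tk' h
    · rename_i hns
      refine ih (c :: cur) acc hacc ?_ tk htk
      intro c' hc'
      rcases List.mem_cons.mp hc' with h | h
      · subst h; exact Bool.eq_false_iff.mpr hns
      · exact hcur c' h

theorem pv_token_no_space (text t : String) (ht : t ∈ PySem.Str.split₀ text) :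
    ∀ c ∈ t.toList, PySem.Chars.isspace c = false := by
  have h1 : t.toList ∈ PySem.Chars.split₀ text.toList := by
    rw [← PySem.Str.split₀_map_toList]
    exact List.mem_map_of_mem ht
  exact pv_split₀_go_no_space text.toList [] [] (by simp) (by simp) t.toList h1

theorem pv_no_paint_seed (t : String)
    (h : ∀ c ∈ t.toList, PySem.Chars.isspace c = false) :
    PySem.Str.isIn "Paint Seed:" t = false := by
  rw [PySem.Str.isIn_eq, PySem.Chars.isIn_eq_false_iff]
  intro hinf
  have hsp : ' ' ∈ t.toList := hinf.subset (by decide)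
  have := h ' ' hsp
  simp [PySem.Chars.isspace] at this

-- the literal value of pyCategories.items (proof-side only)
def pvCatItems : List (String × List String) := [("Blue-Gem", ["490", "148", "69", "704", "504"]),
   ("Rank 1", ["16", "48", "66", "67", "96", "111", "117", "159", "259", "263", "273", "297", "308", "321", "324",
               "341", "347", "461", "482", "517", "530", "567", "587", "674", "695", "723", "764", "772", "781", "790",
               "792", "843", "880", "885", "904", "948", "990"]),
   ("Rank 2", ["09", "116", "134", "158", "168", "225", "338", "354", "356", "365", "370", "386", "406", "426", "433",
               "441", "483", "537", "542", "592", "607", "611", "651", "668", "673", "696", "730", "743", "820", "846",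
               "856", "857", "870", "876", "878", "882", "898", "900", "925", "942", "946", "951", "953", "970", "998"])]

theorem pv_items_eq : pyCategories.items = pvCatItems := by decide

def pvL0 : List String := (pvCatItems.headI).2
def pvL1 : List String := (pvCatItems.tail.headI).2
def pvL2 : List String := (pvCatItems.tail.tail.headI).2

-- B's split-literal constants are exactly the category lists of A
theorem pvBLUE_eq : pvBLUE = pvL0 := by decide
set_option maxRecDepth 20000 in
theorem pvRANK1_eq : pvRANK1 = pvL1 := by decide
set_option maxRecDepth 20000 in
theorem pvRANK2_eq : pvRANK2 = pvL2 := by decide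

theorem pv_classify_cases (t : String) :
    pvClassify pyCategories.items t = none ∨
    pvClassify pyCategories.items t = some "Blue-Gem" ∨
    pvClassify pyCategories.items t = some "Rank 1" ∨
    pvClassify pyCategories.items t = some "Rank 2" := by
  unfold pvClassify
  rw [pv_items_eq]
  cases h : pvCatItems.find? (fun p => decide (t ∈ p.2)) with
  | none => left; rfl
  | some p =>
    have hm := List.mem_of_find?_eq_some h
    unfold pvCatItems at hm
    simp only [List.mem_cons, List.not_mem_nil, or_false] at hm
    rcases hm with hm | hm | hm <;> rw [hm]
    · right; left; rfl
    · right; right; left; rfl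
    · right; right; right; rfl

-- one A-step on the canonical shape
theorem pvStepA_shape (bs r1 r2 os all : List String) (t : String)
    (ht : ∀ c ∈ t.toList, PySem.Chars.isspace c = false) :
    pvStepA (pvShape bs r1 r2 os, all) t =
      (pvShape (bs ++ if pvClassify pyCategories.items t = some "Blue-Gem" then [t] else [])
               (r1 ++ if pvClassify pyCategories.items t = some "Rank 1" then [t] else [])
               (r2 ++ if pvClassify pyCategories.items t = some "Rank 2" then [t] else [])
               (os ++ if pvClassify pyCategories.items t = none then [t] else []),
       all ++ [t]) := by
  have hps := pv_no_paint_seed t ht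
  rcases pv_classify_cases t with hcl | hcl | hcl | hcl <;>
    rcases eq_or_ne os [] with hos | hos <;>
    · simp only [pvStepA, hps, Bool.false_eq_true, if_false, pvMatchLoopA_eq, hcl]
      simp [pvShape, hos, PySem.Dict.modify, PySem.Dict.insert, PySem.Dict.getD,
        PySem.Dict.get?, PySem.Dict.contains]

def pvFA (ts : List String) (c : String) : List String :=
  ts.filter (fun t => pvClassify pyCategories.items t == some c)

def pvFO (ts : List String) : List String :=
  ts.filter (fun t => (pvClassify pyCategories.items t).isNone)

theorem pv_foldA (ts : List String)
    (h : ∀ t ∈ ts, ∀ c ∈ t.toList, PySem.Chars.isspace c = false) :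
    ts.foldl pvStepA (pvShape [] [] [] [], []) =
      (pvShape (pvFA ts "Blue-Gem") (pvFA ts "Rank 1") (pvFA ts "Rank 2") (pvFO ts), ts) := by
  induction ts using List.reverseRecOn with
  | nil => rfl
  | append_singleton ts t ih =>
    have h1 : ∀ u ∈ ts, ∀ c ∈ u.toList, PySem.Chars.isspace c = false :=
      fun u hu => h u (by simp [hu])
    rw [List.foldl_append, ih h1, List.foldl_cons, List.foldl_nil,
      pvStepA_shape _ _ _ _ _ t (h t (by simp))]
    simp [pvFA, pvFO, List.filter_append, List.filter_singleton, beq_iff_eq, Bool.cond_eq_ite,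
      Option.isNone_iff_eq_none]

-- pvClassify as a case split on membership in the three literal lists
theorem pv_classify_unfold (t : String) :
    pvClassify pyCategories.items t =
      if t ∈ pvL0 then some "Blue-Gem"
      else if t ∈ pvL1 then some "Rank 1"
      else if t ∈ pvL2 then some "Rank 2"
      else none := by
  rw [pvClassify, pv_items_eq,
    show pvCatItems = [("Blue-Gem", pvL0), ("Rank 1", pvL1), ("Rank 2", pvL2)] from rfl]
  by_cases h0 : t ∈ pvL0 <;>
    by_cases h1 : t ∈ pvL1 <;>
    by_cases h2 : t ∈ pvL2 <;>
    simp [List.find?, h0, h1, h2]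

-- the four filter predicates of A's canonical shape equal B's guarded membership tests
theorem pv_pred_blue (t : String) :
    (pvClassify pyCategories.items t == some "Blue-Gem") = pvBLUE.contains t := by
  rw [pv_classify_unfold, pvBLUE_eq]
  by_cases h0 : t ∈ pvL0 <;>
    by_cases h1 : t ∈ pvL1 <;>
    by_cases h2 : t ∈ pvL2 <;>
    simp_all

theorem pv_pred_r1 (t : String) :
    (pvClassify pyCategories.items t == some "Rank 1")
      = (pvRANK1.contains t && !pvBLUE.contains t) := by
  rw [pv_classify_unfold, pvBLUE_eq, pvRANK1_eq]
  by_cases h0 : t ∈ pvL0 <;>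
    by_cases h1 : t ∈ pvL1 <;>
    by_cases h2 : t ∈ pvL2 <;>
    simp_all

theorem pv_pred_r2 (t : String) :
    (pvClassify pyCategories.items t == some "Rank 2")
      = (pvRANK2.contains t && !pvBLUE.contains t && !pvRANK1.contains t) := by
  rw [pv_classify_unfold, pvBLUE_eq, pvRANK1_eq, pvRANK2_eq]
  by_cases h0 : t ∈ pvL0 <;>
    by_cases h1 : t ∈ pvL1 <;>
    by_cases h2 : t ∈ pvL2 <;>
    simp_all

theorem pv_pred_other (t : String) :
    (pvClassify pyCategories.items t).isNone
      = (!pvBLUE.contains t && !pvRANK1.contains t && !pvRANK2.contains t) := by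
  rw [pv_classify_unfold, pvBLUE_eq, pvRANK1_eq, pvRANK2_eq]
  by_cases h0 : t ∈ pvL0 <;>
    by_cases h1 : t ∈ pvL1 <;>
    by_cases h2 : t ∈ pvL2 <;>
    simp_all

-- ===== VERDICT =====
theorem categorize_numbers_spec : Claim_equal_categorize_numbers := by
  intro text _
  unfold Spec_categorize_numbers
  unfold categorize_numbers categorize_numbers_alt
  dsimp only
  have htok := pv_token_no_space text
  have h0 : (pyCategories.keys.foldl
      (fun d cat => d.insert cat ([] : List String)) PySem.Dict.empty) = pvShape [] [] [] [] := by
    decide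
  rw [h0, pv_foldA _ htok]
  have hb : pvFA (PySem.Str.split₀ text) "Blue-Gem"
      = (PySem.Str.split₀ text).filter (fun t => pvBLUE.contains t) :=
    List.filter_congr (fun t _ => pv_pred_blue t)
  have h1 : pvFA (PySem.Str.split₀ text) "Rank 1"
      = (PySem.Str.split₀ text).filter (fun t => pvRANK1.contains t && !pvBLUE.contains t) :=
    List.filter_congr (fun t _ => pv_pred_r1 t)
  have h2 : pvFA (PySem.Str.split₀ text) "Rank 2"
      = (PySem.Str.split₀ text).filter
          (fun t => pvRANK2.contains t && !pvBLUE.contains t && !pvRANK1.contains t) :=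
    List.filter_congr (fun t _ => pv_pred_r2 t)
  have ho : pvFO (PySem.Str.split₀ text)
      = (PySem.Str.split₀ text).filter
          (fun t => !pvBLUE.contains t && !pvRANK1.contains t && !pvRANK2.contains t) :=
    List.filter_congr (fun t _ => pv_pred_other t)
  rw [hb, h1, h2, ho]
  unfold pvShape
  rcases eq_or_ne ((PySem.Str.split₀ text).filter
      (fun t => !pvBLUE.contains t && !pvRANK1.contains t && !pvRANK2.contains t)) [] with hos | hos
  · rw [hos]
    rfl
  · rw [if_neg hos, if_neg (by simpa [List.isEmpty_iff] using hos)]
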